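-- pv_equiv track=rewrite | github.com/yashdahekar/iNeuron-assignment | PPT_Assigments/assigment10.py | count_contiguous_substrings
-- ===== SOURCE A (Python) =====
-- def count_contiguous_substrings(S):
--     count = 0
--     for i in range(len(S)):
--         count += 1
--         for j in range(i + 1, len(S)):
--             if S[j] == S[i]:
--                 count += 1
--             else:
--                 break
--     return count
-- ===== SOURCE B (Python) =====
-- def count_contiguous_substrings(S):
--     total = 0
--     i = 0
--     n = len(S)
--     while i < n:
--         j = i
--         while j < n and S[j] == S[i]:
--             j += 1
--         L = j - i
--         total += L * (L + 1) // 2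
--         i = j
--     return total
-- ===== Notes on version B (the rewrite author's own statement) =====
-- stated objective: faster
-- what changed: Instead of restarting an inner scan at every index i (A), B walks each maximal run of equal characters once and adds L*(L+1)/2 per run of length L.
import Mathlib
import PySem

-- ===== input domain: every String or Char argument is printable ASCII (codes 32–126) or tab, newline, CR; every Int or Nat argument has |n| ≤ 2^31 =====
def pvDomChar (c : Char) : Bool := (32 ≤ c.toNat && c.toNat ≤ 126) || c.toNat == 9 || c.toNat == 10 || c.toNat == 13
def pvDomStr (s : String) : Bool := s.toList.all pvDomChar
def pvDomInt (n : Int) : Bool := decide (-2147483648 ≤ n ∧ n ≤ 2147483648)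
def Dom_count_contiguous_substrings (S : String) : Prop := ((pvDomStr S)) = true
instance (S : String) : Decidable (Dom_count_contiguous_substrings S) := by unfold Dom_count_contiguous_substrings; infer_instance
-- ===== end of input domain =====

-- B replaces A's per-index inner rescan by a single left-to-right walk over maximal
-- runs of equal characters, adding L*(L+1)/2 per run (objective: faster, O(n) vs O(n^2)).

-- ===== PORT A =====
-- inner loop: for j in range(i+1, len(S)): if S[j]==S[i]: count += 1 else: break
def aInner (cs : List Char) (ci : Char) (j : Nat) : Nat :=
  if h : j < cs.length then
    if cs[j]'h = ci then 1 + aInner cs ci (j + 1) else 0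
  else 0
termination_by cs.length - j

-- outer loop: for i in range(len(S)): count += 1; <inner loop>
def aOuter (cs : List Char) (i : Nat) : Nat :=
  if h : i < cs.length then (1 + aInner cs (cs[i]'h) (i + 1)) + aOuter cs (i + 1)
  else 0
termination_by cs.length - i

-- all counts are nonnegative, so the Python int is computed in Nat and cast once
def count_contiguous_substrings (S : String) : Int :=
  (aOuter S.toList 0 : Nat)

-- ===== PORT B =====
-- inner while: j += 1 while j < n and S[j] == S[i]  (length of the run after its head)
def bRunLen (c : Char) : List Char → Nat
  | [] => 0
  | x :: t => if x = c then 1 + bRunLen c t else 0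

-- outer while over run starts; L*(L+1)//2 on nonnegative ints = Nat division
def bLoop : List Char → Nat
  | [] => 0
  | c :: t =>
    let k := bRunLen c t
    ((1 + k) * ((1 + k) + 1)) / 2 + bLoop (t.drop k)
termination_by l => l.length
decreasing_by simp [List.length_drop]

def count_contiguous_substrings_alt (S : String) : Int :=
  (bLoop S.toList : Nat)

-- ===== PRECONDITION & SPEC =====
def Spec_count_contiguous_substrings (S : String) (out : Int) : Prop := out = count_contiguous_substrings_alt S
instance (S : String) (out : Int) : Decidable (Spec_count_contiguous_substrings S out) := by unfold Spec_count_contiguous_substrings; infer_instance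

-- ===== CLAIM (what is proved, stated in full; the proofs are below) =====
def Claim_equal_count_contiguous_substrings : Prop := ∀ (S : String), Dom_count_contiguous_substrings S → Spec_count_contiguous_substrings S (count_contiguous_substrings S)

-- ===== LEMMAS AND PROOFS =====

-- suffix-style recursion equal to A's outer loop
def fSum : List Char → Nat
  | [] => 0
  | c :: t => (1 + bRunLen c t) + fSum t

theorem aInner_eq_bRunLen (cs : List Char) (ci : Char) (j : Nat) :
    aInner cs ci j = bRunLen ci (cs.drop j) := by
  fun_induction aInner cs ci j with
  | case1 j h heq ih =>
    rw [List.drop_eq_getElem_cons h]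
    simp [bRunLen, heq, ih]
  | case2 j h heq =>
    rw [List.drop_eq_getElem_cons h]
    simp [bRunLen, heq]
  | case3 j h =>
    rw [List.drop_eq_nil_of_le (by omega)]
    simp [bRunLen]

theorem aOuter_eq_fSum (cs : List Char) (i : Nat) :
    aOuter cs i = fSum (cs.drop i) := by
  fun_induction aOuter cs i with
  | case1 i h ih =>
    rw [List.drop_eq_getElem_cons h]
    simp [fSum, ih, aInner_eq_bRunLen]
  | case2 i h =>
    rw [List.drop_eq_nil_of_le (by omega)]
    simp [fSum]

theorem fSum_run (c : Char) (t : List Char) :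
    fSum (c :: t) = ((1 + bRunLen c t) * ((1 + bRunLen c t) + 1)) / 2
      + fSum (t.drop (bRunLen c t)) := by
  induction t generalizing c with
  | nil => simp [fSum, bRunLen]
  | cons x t' ih =>
    by_cases hx : x = c
    · subst hx
      have hk : bRunLen x (x :: t') = 1 + bRunLen x t' := by simp [bRunLen]
      rw [hk]
      have := ih x
      set m := 1 + bRunLen x t' with hm
      have hdrop : (x :: t').drop (1 + bRunLen x t') = t'.drop (bRunLen x t') := by
        simp [List.drop_succ_cons, Nat.add_comm]
      rw [hdrop]
      have hL : fSum (x :: x :: t') = (1 + m) + fSum (x :: t') := by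
        simp [fSum, bRunLen, hm]
        try ring
      rw [hL, this]
      have h2 : 2 ∣ m * (m + 1) := (Nat.even_mul_succ_self m).two_dvd
      have hb : (1 + m) * (1 + m + 1) = m * (m + 1) + 2 * (m + 1) := by ring
      omega
    · have hk : bRunLen c (x :: t') = 0 := by simp [bRunLen, hx]
      rw [hk]
      simp [fSum, bRunLen, hx]

theorem fSum_eq_bLoop (cs : List Char) : fSum cs = bLoop cs := by
  fun_induction bLoop cs with
  | case1 => simp [fSum]
  | case2 c t k ih =>
    have hk : k = bRunLen c t := rfl
    rw [fSum_run c t, ← hk, ih]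

-- ===== VERDICT (by name: the statement is the Claim_ definition above) =====
theorem count_contiguous_substrings_spec : Claim_equal_count_contiguous_substrings := by
  intro S _
  unfold Spec_count_contiguous_substrings count_contiguous_substrings count_contiguous_substrings_alt
  rw [aOuter_eq_fSum, List.drop_zero, fSum_eq_bLoop]
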